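-- pv_equiv track=rewrite | github.com/saladlemon/practicealgorithm | 프로그래머스/unrated/181928. 이어 붙인 수/이어 붙인 수.py | solution
-- ===== SOURCE A (Python) =====
-- def solution(num_list):
--     even = 0
--     odd = 0
--     for i in range(0, len(num_list)):
--         if num_list[i]%2 == 0:
--             even = even*10 + num_list[i]
--         else:
--             odd = odd*10 + num_list[i]
--     Sum = even + odd
--     return Sum
-- ===== SOURCE B (Python) =====
-- def solution(num_list):
--     # Right-to-left pass: each element contributes x * 10^k, where k is the
--     # number of later elements of the same parity; running power-of-ten weights.
--     total = 0
--     p_even = 1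
--     p_odd = 1
--     for x in reversed(num_list):
--         if x % 2 == 0:
--             total += x * p_even
--             p_even *= 10
--         else:
--             total += x * p_odd
--             p_odd *= 10
--     return total
-- ===== Notes on version B (the rewrite author's own statement) =====
-- stated objective: alternative
-- what changed: Instead of A's left-to-right acc*10+digit concatenation folds, B walks the list right-to-left and sums each element's positional contribution x*10^k directly, maintaining two running power-of-ten weights (one per parity) rather than concatenation accumulators.
import Mathlib
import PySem

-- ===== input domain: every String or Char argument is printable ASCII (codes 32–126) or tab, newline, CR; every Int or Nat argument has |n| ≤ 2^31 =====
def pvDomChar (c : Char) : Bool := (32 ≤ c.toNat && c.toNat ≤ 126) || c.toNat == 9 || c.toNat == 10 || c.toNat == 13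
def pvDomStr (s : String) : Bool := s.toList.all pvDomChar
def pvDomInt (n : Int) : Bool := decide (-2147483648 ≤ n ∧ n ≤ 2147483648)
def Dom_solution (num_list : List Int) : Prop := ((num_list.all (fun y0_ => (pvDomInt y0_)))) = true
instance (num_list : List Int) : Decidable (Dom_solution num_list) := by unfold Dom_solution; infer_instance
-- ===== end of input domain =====

-- B walks the list right-to-left, summing each element's positional contribution x*10^k
-- with running power-of-ten weights per parity, instead of A's acc*10+digit folds; same O(n) cost.

-- ===== PORT A =====
-- indexed loop over range(0, len) carrying the two accumulators (even, odd) as a pair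
def solution (num_list : List Int) : Int :=
  let r := (PySem.List.pyRange 0 (PySem.List.len num_list) 1).foldl
    (fun (s : Int × Int) i =>
      let v := PySem.List.pyGetD num_list i 0
      if PySem.Int.mod v 2 = 0 then (s.1 * 10 + v, s.2) else (s.1, s.2 * 10 + v))
    (0, 0)
  r.1 + r.2

-- ===== PORT B =====
-- loop over reversed(num_list) with state (total, p_even, p_odd)
def solution_alt (num_list : List Int) : Int :=
  let r := num_list.reverse.foldl
    (fun (s : Int × Int × Int) x =>
      if PySem.Int.mod x 2 = 0 then (s.1 + x * s.2.1, s.2.1 * 10, s.2.2)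
      else (s.1 + x * s.2.2, s.2.1, s.2.2 * 10))
    (0, 1, 1)
  r.1

-- ===== PRECONDITION & SPEC =====
def Spec_solution (num_list : List Int) (out : Int) : Prop := out = solution_alt num_list
instance (num_list : List Int) (out : Int) : Decidable (Spec_solution num_list out) := by unfold Spec_solution; infer_instance

-- ===== CLAIM (what is proved, stated in full; the proofs are below) =====
def Claim_equal_solution : Prop := ∀ (num_list : List Int), Dom_solution num_list → Spec_solution num_list (solution num_list)

-- ===== LEMMAS AND PROOFS =====

-- little-endian value of a digit list: sum of l[i] * 10^i
def pvValLE (l : List Int) : Int := l.foldr (fun y a => y + 10 * a) 0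

theorem pvValLE_append_singleton (l : List Int) (x : Int) :
    pvValLE (l ++ [x]) = pvValLE l + x * 10 ^ l.length := by
  induction l with
  | nil => simp [pvValLE]
  | cons y t ih => simp [pvValLE, List.foldr_append] at ih ⊢; rw [ih]; ring

-- A's concatenation fold is the little-endian value of the reversed list (shifted by the seed)
theorem pvFoldlConcat (l : List Int) (e : Int) :
    l.foldl (fun a b => a * 10 + b) e = e * 10 ^ l.length + pvValLE l.reverse := by
  induction l generalizing e with
  | nil => simp [pvValLE]
  | cons x t ih =>
    simp only [List.foldl_cons, List.reverse_cons, ih, pvValLE_append_singleton,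
      List.length_cons, List.length_reverse]
    ring

-- the paired fold of A computes the two per-parity concatenation folds
theorem pvPairFold (xs : List Int) (e o : Int) :
    xs.foldl
      (fun (s : Int × Int) v =>
        if PySem.Int.mod v 2 = 0 then (s.1 * 10 + v, s.2) else (s.1, s.2 * 10 + v))
      (e, o)
    = ((xs.filter (fun x => decide (PySem.Int.mod x 2 = 0))).foldl (fun a b => a * 10 + b) e,
       (xs.filter (fun x => !decide (PySem.Int.mod x 2 = 0))).foldl (fun a b => a * 10 + b) o) := by
  induction xs generalizing e o with
  | nil => rfl
  | cons x t ih =>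
    by_cases h : PySem.Int.mod x 2 = 0 <;>
      simp only [List.foldl_cons, List.filter_cons, h, decide_true, decide_false,
        Bool.not_true, Bool.not_false, Bool.false_eq_true, if_pos, ite_false, ih]

-- B's weighted fold computes the two little-endian parity values, scaled by the incoming weights
theorem pvTripleFold (ys : List Int) (t pe po : Int) :
    (ys.foldl
      (fun (s : Int × Int × Int) x =>
        if PySem.Int.mod x 2 = 0 then (s.1 + x * s.2.1, s.2.1 * 10, s.2.2)
        else (s.1 + x * s.2.2, s.2.1, s.2.2 * 10))
      (t, pe, po)).1
    = t + pe * pvValLE (ys.filter (fun x => decide (PySem.Int.mod x 2 = 0)))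
        + po * pvValLE (ys.filter (fun x => !decide (PySem.Int.mod x 2 = 0))) := by
  induction ys generalizing t pe po with
  | nil => simp [pvValLE]
  | cons x s ih =>
    by_cases h : PySem.Int.mod x 2 = 0 <;>
      simp only [List.foldl_cons, List.filter_cons, h, decide_true, decide_false,
        Bool.not_true, Bool.not_false, Bool.false_eq_true, if_pos, ite_false, ih, pvValLE,
        List.foldr_cons] <;> ring

-- ===== VERDICT (by name: the statement is the Claim_ definition above) =====
theorem solution_spec : Claim_equal_solution := by
  intro num_list _
  show solution num_list = solution_alt num_list
  simp only [solution, solution_alt]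
  rw [PySem.List.foldl_pyRange_zero_pyGetD num_list 0
        (fun (s : Int × Int) v =>
          if PySem.Int.mod v 2 = 0 then (s.1 * 10 + v, s.2) else (s.1, s.2 * 10 + v))
        ((0 : Int), (0 : Int)),
      pvPairFold, pvTripleFold]
  simp only [List.filter_reverse, pvFoldlConcat]
  ring
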